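-- pv_equiv track=rewrite | github.com/Sanskrit-Org/Indrak | परीक्षण/ex1.py | parse
-- ===== SOURCE A (Python) =====
-- def parse(astr):
--     astr=astr.replace(',','')
--     astr=astr.replace('and','')
--     tokens=astr.split()
--     dept=None
--     number=None
--     result=[]
--     option=[]
--     for tok in tokens:
--         if tok=='or':
--             result.append(option)
--             option=[]
--             continue
--         if tok.isalpha():
--             dept=tok
--             number=None
--         else:
--             number=int(tok)
--         if dept and number:
--             option.append((dept,number))
--     else:
--         if option:
--             result.append(option)
--     return result
-- ===== SOURCE B (Python) =====
-- def parse(astr):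
--     tokens = astr.replace(',', '').replace('and', '').split()
--     # phase 1: split the token stream on 'or', keeping empty groups
--     groups = [[]]
--     for t in tokens:
--         if t == 'or':
--             groups.append([])
--         else:
--             groups[-1].append(t)
--     # phase 2: pair each number with the most recent department, carried across groups
--     dept = None
--     result = []
--     for g in groups:
--         option = []
--         for t in g:
--             if t.isalpha():
--                 dept = t
--             else:
--                 n = int(t)
--                 if dept and n:
--                     option.append((dept, n))
--         result.append(option)
--     # a trailing empty option is dropped (mid-stream empty options are kept)
--     if result and not result[-1]:
--         result.pop()
--     return result
-- ===== Notes on version B (the rewrite author's own statement) =====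
-- stated objective: alternative
-- what changed: A interleaves everything in one stateful token loop with a for-else; B decomposes into two phases: first split the token stream on 'or' into groups (keeping empty groups), then process each group into an option with the department carried across group boundaries, finally dropping a trailing empty option.
import Mathlib
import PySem

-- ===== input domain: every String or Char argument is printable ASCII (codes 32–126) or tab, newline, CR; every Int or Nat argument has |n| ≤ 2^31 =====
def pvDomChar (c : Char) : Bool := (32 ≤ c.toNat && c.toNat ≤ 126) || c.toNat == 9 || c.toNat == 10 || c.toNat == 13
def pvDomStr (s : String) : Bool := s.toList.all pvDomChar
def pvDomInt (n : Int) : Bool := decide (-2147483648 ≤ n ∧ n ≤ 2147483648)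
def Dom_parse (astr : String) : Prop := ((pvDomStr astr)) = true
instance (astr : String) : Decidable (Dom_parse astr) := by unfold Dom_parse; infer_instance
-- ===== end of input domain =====

-- B re-decomposes A's single stateful loop into: split the token stream on 'or' into groups,
-- process each group (department carried across groups), drop a trailing empty option (objective: alternative decomposition).

-- ===== PORT A =====
-- Python truthiness of `dept and number` (dept : Optional[str], number : Optional[int])
def pvTruthy (dept : Option String) (number : Option Int) : Bool :=
  match dept, number with
  | some d, some n => d ≠ "" && n ≠ 0
  | _, _ => false

-- the for-loop of A, state (dept, number, result, option); the base case is the for-else clause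
def parseLoopA (tokens : List String) (dept : Option String) (number : Option Int)
    (result : List (List (String × Int))) (option : List (String × Int)) :
    List (List (String × Int)) :=
  match tokens with
  | [] => if option ≠ [] then result ++ [option] else result
  | tok :: ts =>
    if tok == "or" then
      parseLoopA ts dept number (result ++ [option]) []
    else
      let dept' := if PySem.Str.strIsalpha tok then some tok else dept
      let number' := if PySem.Str.strIsalpha tok then none else PySem.Int.ofStr? tok
      -- int(tok) raises ValueError when ofStr? = none: excluded by Pre_parse
      let option' := if pvTruthy dept' number' then
          option ++ [(dept'.getD "", number'.getD 0)] else option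
      parseLoopA ts dept' number' result option'

def parse (astr : String) : List (List (String × Int)) :=
  let astr1 := PySem.Str.replace astr "," ""
  let astr2 := PySem.Str.replace astr1 "and" ""
  let tokens := PySem.Str.split₀ astr2
  parseLoopA tokens none none [] []

-- ===== PORT B =====
-- phase 1 of B: split the token stream on 'or', keeping empty groups
def pvBuildGroups (tokens : List String) (cur : List String) : List (List String) :=
  match tokens with
  | [] => [cur]
  | t :: ts => if t == "or" then cur :: pvBuildGroups ts [] else pvBuildGroups ts (cur ++ [t])

-- the inner loop of B's phase 2: process one group, returning (option, dept)
def pvGroupLoop (g : List String) (dept : Option String) (option : List (String × Int)) :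
    List (String × Int) × Option String :=
  match g with
  | [] => (option, dept)
  | t :: ts =>
    if PySem.Str.strIsalpha t then pvGroupLoop ts (some t) option
    else
      match PySem.Int.ofStr? t with        -- int(t); none = ValueError, excluded by Pre_parse
      | some n =>
        if pvTruthy dept (some n) then pvGroupLoop ts dept (option ++ [(dept.getD "", n)])
        else pvGroupLoop ts dept option
      | none => pvGroupLoop ts dept option

-- the outer loop of B's phase 2: one option per group, dept carried across groups
def pvCollect (groups : List (List String)) (dept : Option String) :
    List (List (String × Int)) :=
  match groups with
  | [] => []
  | g :: gs =>
    let (option, dept') := pvGroupLoop g dept []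
    option :: pvCollect gs dept'

-- final step of B: `if result and not result[-1]: result.pop()`
def pvPopTrailingEmpty (result : List (List (String × Int))) : List (List (String × Int)) :=
  if result ≠ [] ∧ result.getLast? = some [] then result.dropLast else result

def parse_alt (astr : String) : List (List (String × Int)) :=
  let tokens := PySem.Str.split₀ (PySem.Str.replace (PySem.Str.replace astr "," "") "and" "")
  let groups := pvBuildGroups tokens []
  pvPopTrailingEmpty (pvCollect groups none)

-- ===== PRECONDITION & SPEC =====
-- Pre_ excludes exactly the inputs where A raises ValueError: a token that is neither
-- alphabetic nor parseable by int().
def Pre_parse (astr : String) : Prop :=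
  (PySem.Str.split₀ (PySem.Str.replace (PySem.Str.replace astr "," "") "and" "")).all
    (fun t => PySem.Str.strIsalpha t || (PySem.Int.ofStr? t).isSome) = true

instance (astr : String) : Decidable (Pre_parse astr) := by unfold Pre_parse; infer_instance

def pvWitness_parse : String := "CS 101, and 102 or MATH 2"

def Spec_parse (astr : String) (out : List (List (String × Int))) : Prop := out = parse_alt astr
instance (astr : String) (out : List (List (String × Int))) : Decidable (Spec_parse astr out) := by unfold Spec_parse; infer_instance

-- ===== CLAIM (what is proved, stated in full; the proofs are below) =====
def Claim_equal_parse : Prop := ∀ (astr : String), Dom_parse astr → Pre_parse astr → Spec_parse astr (parse astr)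

-- ===== LEMMAS AND PROOFS =====

-- proof-side reference recursion: the rest of the result from (tokens, dept, option)
def pvR (tokens : List String) (dept : Option String) (option : List (String × Int)) :
    List (List (String × Int)) :=
  match tokens with
  | [] => if option ≠ [] then [option] else []
  | t :: ts =>
    if t == "or" then option :: pvR ts dept []
    else if PySem.Str.strIsalpha t then pvR ts (some t) option
    else
      match PySem.Int.ofStr? t with
      | some n =>
        if pvTruthy dept (some n) then pvR ts dept (option ++ [(dept.getD "", n)])
        else pvR ts dept option
      | none => pvR ts dept option

theorem parseLoopA_eq_R (tokens : List String) :
    ∀ (dept : Option String) (number : Option Int) (result : List (List (String × Int)))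
      (option : List (String × Int)),
      parseLoopA tokens dept number result option = result ++ pvR tokens dept option := by
  induction tokens with
  | nil =>
    intro dept number result option
    simp only [parseLoopA, pvR]
    split <;> simp
  | cons t ts ih =>
    intro dept number result option
    simp only [parseLoopA, pvR]
    by_cases hor : t == "or"
    · simp [hor, ih]
    · by_cases ha : PySem.Chars.strIsalpha t.toList = true
      · simp [hor, PySem.Str.strIsalpha_eq, ha, ih, pvTruthy]
      · simp only [hor, PySem.Str.strIsalpha_eq, ha, Bool.false_eq_true, if_false]
        cases hn : PySem.Int.ofStr? t with
        | none => simp [ih, pvTruthy]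
        | some n =>
          by_cases ht : pvTruthy dept (some n) <;> simp [ht, ih]

theorem pvGroupLoop_append (xs ys : List String) :
    ∀ (dept : Option String) (option : List (String × Int)),
      pvGroupLoop (xs ++ ys) dept option =
        pvGroupLoop ys (pvGroupLoop xs dept option).2 (pvGroupLoop xs dept option).1 := by
  induction xs with
  | nil => intro dept option; simp [pvGroupLoop]
  | cons t ts ih =>
    intro dept option
    simp only [List.cons_append, pvGroupLoop]
    by_cases ha : PySem.Chars.strIsalpha t.toList = true
    · simp [PySem.Str.strIsalpha_eq, ha, ih]
    · simp only [PySem.Str.strIsalpha_eq, ha, Bool.false_eq_true, if_false]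
      cases hn : PySem.Int.ofStr? t with
      | none => simp [ih]
      | some n =>
        by_cases ht : pvTruthy dept (some n) <;> simp [ht, ih]

theorem pvBuildGroups_ne_nil (tokens cur : List String) : pvBuildGroups tokens cur ≠ [] := by
  cases tokens with
  | nil => simp [pvBuildGroups]
  | cons t ts => simp only [pvBuildGroups]; split <;> simp [pvBuildGroups_ne_nil]

theorem pvCollect_ne_nil (groups : List (List String)) (dept : Option String)
    (h : groups ≠ []) : pvCollect groups dept ≠ [] := by
  cases groups with
  | nil => exact absurd rfl h
  | cons g gs => simp [pvCollect]

theorem pvPop_cons (o : List (String × Int)) (rest : List (List (String × Int)))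
    (h : rest ≠ []) : pvPopTrailingEmpty (o :: rest) = o :: pvPopTrailingEmpty rest := by
  obtain ⟨r, rs, rfl⟩ := List.exists_cons_of_ne_nil h
  simp [pvPopTrailingEmpty]
  split <;> simp

theorem pvCollect_eq_R (tokens : List String) :
    ∀ (cur : List String) (dept : Option String),
      pvPopTrailingEmpty (pvCollect (pvBuildGroups tokens cur) dept) =
        pvR tokens (pvGroupLoop cur dept []).2 (pvGroupLoop cur dept []).1 := by
  induction tokens with
  | nil =>
    intro cur dept
    simp only [pvBuildGroups, pvCollect, pvR, pvPopTrailingEmpty]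
    rcases h : pvGroupLoop cur dept [] with ⟨o, d⟩
    by_cases ho : o = [] <;> simp [ho]
  | cons t ts ih =>
    intro cur dept
    simp only [pvBuildGroups, pvR]
    by_cases hor : t == "or"
    · rcases h : pvGroupLoop cur dept [] with ⟨o, d⟩
      have hrest : pvCollect (pvBuildGroups ts []) d ≠ [] :=
        pvCollect_ne_nil _ _ (pvBuildGroups_ne_nil ts [])
      have hih := ih [] d
      simp only [pvGroupLoop] at hih
      simp only [hor, if_true, pvCollect, h]
      rw [pvPop_cons _ _ hrest, hih]
    · simp only [hor, Bool.false_eq_true, if_false]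
      rw [ih (cur ++ [t]) dept]
      rw [pvGroupLoop_append cur [t] dept []]
      rcases h : pvGroupLoop cur dept [] with ⟨o, d⟩
      simp only [pvGroupLoop]
      by_cases ha : PySem.Chars.strIsalpha t.toList = true
      · simp [PySem.Str.strIsalpha_eq, ha]
      · simp only [PySem.Str.strIsalpha_eq, ha, Bool.false_eq_true, if_false]
        cases hn : PySem.Int.ofStr? t with
        | none => simp
        | some n =>
          by_cases ht : pvTruthy d (some n) <;> simp [ht]

-- ===== VERDICT (by name: the statement is the Claim_ definition above) =====
theorem parse_spec : Claim_equal_parse := by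
  intro astr _ _
  unfold Spec_parse parse parse_alt
  rw [parseLoopA_eq_R]
  have h := pvCollect_eq_R
    (PySem.Str.split₀ (PySem.Str.replace (PySem.Str.replace astr "," "") "and" "")) [] none
  simp only [pvGroupLoop] at h
  simp [h]
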